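-- pv_equiv track=rewrite | github.com/kanstancin/blender_spag_generation | gcode_to_npy_p5.py | parse
-- ===== SOURCE A (Python) =====
-- def parse(x):
--     row = [None, None, None]
--     x = x.split(" ")
--     for val in x:
--         if val == None: continue
--         if val[0] == "X": row[0] = val[1:]
--         elif val[0] == "Y": row[1] = val[1:]
--         elif val[0] == "Z": row[2] = val[1:]
--     return row
-- ===== SOURCE B (Python) =====
-- def parse(x):
--     tokens = x.split(" ")
--
--     def last_coord(letter):
--         # scan back-to-front; the first hit is the last occurrence
--         for t in reversed(tokens):
--             if t[:1] == letter:
--                 return t[1:]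
--         return None
--
--     return [last_coord("X"), last_coord("Y"), last_coord("Z")]
-- ===== Notes on version B (the rewrite author's own statement) =====
-- stated objective: alternative
-- what changed: Replaces A's single forward pass that mutates a three-slot row with three independent backward scans, each returning at the first token whose first character is the letter (first hit in reverse = last occurrence forward), keeping no mutable state.
import Mathlib
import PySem

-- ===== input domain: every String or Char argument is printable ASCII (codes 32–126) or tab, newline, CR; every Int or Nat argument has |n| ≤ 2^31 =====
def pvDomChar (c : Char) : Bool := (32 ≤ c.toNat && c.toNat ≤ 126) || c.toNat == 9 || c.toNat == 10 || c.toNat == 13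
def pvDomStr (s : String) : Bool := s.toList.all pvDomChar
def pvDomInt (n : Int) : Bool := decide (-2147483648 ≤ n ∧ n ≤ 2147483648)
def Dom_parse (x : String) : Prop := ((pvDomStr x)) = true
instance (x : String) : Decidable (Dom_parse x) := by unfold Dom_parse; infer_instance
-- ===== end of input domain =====

-- B replaces A's one forward pass with mutable row state by three independent backward scans,
-- each returning at the first token starting with the letter (objective: alternative).

-- ===== PORT A =====
-- row is the triple (row[0], row[1], row[2]); val[0] via pyGet? (none = IndexError, excluded by Pre_parse)
def parseStep (row : Option String × Option String × Option String) (val : List Char) :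
    Option String × Option String × Option String :=
  match PySem.List.pyGet? val 0 with
  | none => row
  | some c =>
    if c = 'X' then (some (String.ofList (PySem.List.slice val (some 1) none)), row.2.1, row.2.2)
    else if c = 'Y' then (row.1, some (String.ofList (PySem.List.slice val (some 1) none)), row.2.2)
    else if c = 'Z' then (row.1, row.2.1, some (String.ofList (PySem.List.slice val (some 1) none)))
    else row

def parse (x : String) : List (Option String) :=
  let row := (PySem.Chars.splitOn x.toList [' ']).foldl parseStep (none, none, none)
  [row.1, row.2.1, row.2.2]

-- ===== PORT B =====
-- last_coord: walk the reversed token list, return at the first token t with t[:1] == letter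
def lastCoord : List (List Char) → Char → Option String
  | [], _ => none
  | t :: rest, letter =>
    if PySem.List.slice t none (some 1) = [letter] then
      some (String.ofList (PySem.List.slice t (some 1) none))
    else lastCoord rest letter

def parse_alt (x : String) : List (Option String) :=
  let tokens := PySem.Chars.splitOn x.toList [' ']
  [lastCoord tokens.reverse 'X', lastCoord tokens.reverse 'Y', lastCoord tokens.reverse 'Z']

-- ===== PRECONDITION & SPEC =====
-- Pre_ excludes exactly the inputs with an empty token (consecutive/leading/trailing spaces or ""),
-- on which Python A raises IndexError at val[0].
def Pre_parse (x : String) : Prop := ∀ v ∈ PySem.Chars.splitOn x.toList [' '], v ≠ []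
instance (x : String) : Decidable (Pre_parse x) := by unfold Pre_parse; infer_instance
def pvWitness_parse : String := "G1 X1.5 Y2 Z3"

def Spec_parse (x : String) (out : List (Option String)) : Prop := out = parse_alt x
instance (x : String) (out : List (Option String)) : Decidable (Spec_parse x out) := by unfold Spec_parse; infer_instance

-- ===== CLAIM (what is proved, stated in full; the proofs are below) =====
def Claim_equal_parse : Prop := ∀ (x : String), Dom_parse x → Pre_parse x → Spec_parse x (parse x)

-- ===== LEMMAS AND PROOFS =====
lemma fold_eq_lastCoord (ts : List (List Char)) (h : ∀ v ∈ ts, v ≠ [])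
    (r : Option String × Option String × Option String) :
    ts.foldl parseStep r =
      ((lastCoord ts.reverse 'X').orElse (fun _ => r.1),
       (lastCoord ts.reverse 'Y').orElse (fun _ => r.2.1),
       (lastCoord ts.reverse 'Z').orElse (fun _ => r.2.2)) := by
  induction ts using List.reverseRecOn generalizing r with
  | nil => simp [lastCoord]
  | append_singleton ts v ih =>
    have hv : v ≠ [] := h v (by simp)
    obtain ⟨c, rest, rfl⟩ : ∃ c rest, v = c :: rest := by
      cases v with
      | nil => exact absurd rfl hv
      | cons c rest => exact ⟨c, rest, rfl⟩
    have hts : ∀ w ∈ ts, w ≠ [] := fun w hw => h w (by simp [hw])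
    rw [List.foldl_append, List.foldl_cons, List.foldl_nil, ih hts]
    have hslice1 : PySem.List.slice (c :: rest) none (some 1) = [c] := by
      simp [PySem.List.slice]
    have hslice2 : PySem.List.slice (c :: rest) (some 1) none = rest := by
      simp [PySem.List.slice]
    simp only [List.reverse_append, List.reverse_cons, List.reverse_nil, List.nil_append,
      List.cons_append, lastCoord, hslice1, hslice2]
    unfold parseStep
    simp only [PySem.List.pyGet?, PySem.List.pyIdx?]
    by_cases hX : c = 'X' <;> by_cases hY : c = 'Y' <;> by_cases hZ : c = 'Z' <;>
      simp_all [Option.orElse, Option.bind]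

-- ===== VERDICT (by name: the statement is the Claim_ definition above) =====
theorem parse_spec : Claim_equal_parse := by
  intro x _ hpre
  unfold Spec_parse parse parse_alt
  rw [fold_eq_lastCoord _ hpre]
  simp
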